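-- pv_equiv track=rewrite | github.com/MageJohn/EMPR_Scanner | src/python/draw.py | edit_control_sequence
-- ===== SOURCE A (Python) =====
-- def edit_control_sequence(sequence, tolerance, up_val):
--     sequence_string = ""
--     sub_string = "d" * tolerance
--     for move in sequence:
--         if move[2] == up_val:
--             sequence_string += "u"
--         else:
--             sequence_string += "d"
--     replacement = "x" * tolerance
--     out = sequence_string.replace(sub_string, replacement)
--     new_sequence = []
--     for i in range(len(sequence)):
--         if out[i] != "d":
--             new_sequence.append(sequence[i])
--     return new_sequence
-- ===== SOURCE B (Python) =====
-- def edit_control_sequence(sequence, tolerance, up_val):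
--     # Single pass: buffer consecutive down-moves; on each up-move (and at the
--     # end) keep only the first (run_len // tolerance) * tolerance of the run.
--     result = []
--     run = []
--     for move in sequence:
--         if move[2] == up_val:
--             if tolerance > 0:
--                 keep = (len(run) // tolerance) * tolerance
--                 result.extend(run[:keep])
--             run = []
--             result.append(move)
--         else:
--             run.append(move)
--     if tolerance > 0:
--         keep = (len(run) // tolerance) * tolerance
--         result.extend(run[:keep])
--     return result
-- ===== Notes on version B (the rewrite author's own statement) =====
-- stated objective: simpler
-- what changed: Replaces A's build-a-u/d-string + str.replace + index-filter pipeline with one direct pass over the moves that buffers each run of down-moves and keeps its first (len//tolerance)*tolerance entries, never materialising any string.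
import Mathlib
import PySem

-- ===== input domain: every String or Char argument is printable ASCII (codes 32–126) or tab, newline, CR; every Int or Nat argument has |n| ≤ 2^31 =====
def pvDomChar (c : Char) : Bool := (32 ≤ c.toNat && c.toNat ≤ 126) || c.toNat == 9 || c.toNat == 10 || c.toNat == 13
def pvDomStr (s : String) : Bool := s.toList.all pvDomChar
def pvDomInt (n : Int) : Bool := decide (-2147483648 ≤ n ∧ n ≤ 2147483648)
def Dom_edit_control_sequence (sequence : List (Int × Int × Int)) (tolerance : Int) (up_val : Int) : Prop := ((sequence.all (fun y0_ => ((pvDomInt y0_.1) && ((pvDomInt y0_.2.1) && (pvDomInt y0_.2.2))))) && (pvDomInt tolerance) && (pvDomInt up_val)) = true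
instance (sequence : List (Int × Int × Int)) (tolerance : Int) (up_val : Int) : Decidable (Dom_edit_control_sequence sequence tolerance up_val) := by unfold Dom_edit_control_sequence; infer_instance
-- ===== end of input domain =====

-- B replaces A's build-a-u/d-string + str.replace + index-filter pipeline by one direct pass
-- over the moves that buffers each run of down-moves and keeps its first (len//tolerance)*tolerance
-- entries (objective: simpler — no string is ever built).

-- ===== PORT A =====
-- Python strings are carried as List Char (PySem.Chars); "d" * tolerance is
-- List.replicate tolerance.toNat 'd' (a negative repeat count gives "" in Python).
def edit_control_sequence (sequence : List (Int × Int × Int)) (tolerance : Int) (up_val : Int) : List (Int × Int × Int) :=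
  let sequence_string : List Char :=
    sequence.foldl (fun s move => s ++ [if move.2.2 == up_val then 'u' else 'd']) []
  let sub_string : List Char := List.replicate tolerance.toNat 'd'
  let replacement : List Char := List.replicate tolerance.toNat 'x'
  let out : List Char := PySem.Chars.replace sequence_string sub_string replacement
  -- for i in range(len(sequence)): out[i] and sequence[i] are always in range here
  -- (|out| = |sequence|), so the catch-all branch is unreachable (Python would raise IndexError)
  (PySem.List.pyRange 0 (sequence.length : Int) 1).foldl
    (fun new_sequence i =>
      match PySem.List.pyGet? out i, PySem.List.pyGet? sequence i with
      | some c, some m => if c ≠ 'd' then new_sequence ++ [m] else new_sequence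
      | _, _ => new_sequence) []

-- ===== PORT B =====
-- flush of the pending down-run: run[:(len(run) // tolerance) * tolerance] when tolerance > 0
-- (the slice bound is ≥ 0 there, so run[:keep] is exactly List.take keep.toNat), else nothing.
def pvFlush (tolerance : Int) (run : List (Int × Int × Int)) : List (Int × Int × Int) :=
  if tolerance > 0 then
    run.take ((PySem.Int.floordiv (run.length : Int) tolerance * tolerance).toNat)
  else []

-- the single pass of Source B: `run` is the buffer of consecutive down-moves
def pvGoB (tolerance : Int) (up_val : Int) : List (Int × Int × Int) → List (Int × Int × Int) → List (Int × Int × Int)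
  | run, [] => pvFlush tolerance run
  | run, move :: rest =>
      if move.2.2 == up_val then
        pvFlush tolerance run ++ move :: pvGoB tolerance up_val [] rest
      else
        pvGoB tolerance up_val (run ++ [move]) rest

def edit_control_sequence_alt (sequence : List (Int × Int × Int)) (tolerance : Int) (up_val : Int) : List (Int × Int × Int) :=
  pvGoB tolerance up_val [] sequence

-- ===== PRECONDITION & SPEC =====
def Spec_edit_control_sequence (sequence : List (Int × Int × Int)) (tolerance : Int) (up_val : Int) (out : List (Int × Int × Int)) : Prop := out = edit_control_sequence_alt sequence tolerance up_val
instance (sequence : List (Int × Int × Int)) (tolerance : Int) (up_val : Int) (out : List (Int × Int × Int)) : Decidable (Spec_edit_control_sequence sequence tolerance up_val out) := by unfold Spec_edit_control_sequence; infer_instance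

-- ===== CLAIM (what is proved, stated in full; the proofs are below) =====
def Claim_equal_edit_control_sequence : Prop := ∀ (sequence : List (Int × Int × Int)) (tolerance : Int) (up_val : Int), Dom_edit_control_sequence sequence tolerance up_val → Spec_edit_control_sequence sequence tolerance up_val (edit_control_sequence sequence tolerance up_val)

-- ===== LEMMAS AND PROOFS =====

-- the u/d tag of one move
def pvTag (up_val : Int) (m : Int × Int × Int) : Char := if m.2.2 == up_val then 'u' else 'd'

-- greedy left-to-right replacement of 'd'^(k+1) by 'x'^(k+1) (the semantics of replace.go)
def pvRepl (k : Nat) : List Char → List Char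
  | [] => []
  | c :: cs =>
      if (List.replicate (k+1) 'd').isPrefixOf (c :: cs) then
        List.replicate (k+1) 'x' ++ pvRepl k (List.drop (k+1) (c :: cs))
      else
        c :: pvRepl k cs
termination_by l => l.length
decreasing_by
  · simp
  · simp

-- A's final loop as a structural recursion: keep sequence[i] wherever out[i] ≠ 'd'
def pvKeep : List (Int × Int × Int) → List Char → List (Int × Int × Int)
  | [], _ => []
  | _ :: _, [] => []
  | m :: ms, c :: cs => if c ≠ 'd' then m :: pvKeep ms cs else pvKeep ms cs

theorem pv_foldl_string (up_val : Int) (seq : List (Int × Int × Int)) (acc : List Char) :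
    seq.foldl (fun s move => s ++ [if move.2.2 == up_val then 'u' else 'd']) acc
      = acc ++ seq.map (pvTag up_val) := by
  induction seq generalizing acc with
  | nil => simp
  | cons m ms ih =>
      simp only [List.foldl_cons, List.map_cons]
      rw [ih]
      simp [pvTag]

theorem pv_replace_empty (s : List Char) : PySem.Chars.replace s [] [] = s := by
  have h : List.flatMap (fun c => c :: ([] : List Char)) s = s := by
    induction s with
    | nil => rfl
    | cons c cs ih => simp [List.flatMap_cons, ih]
  simp [PySem.Chars.replace, h]

theorem pv_go_eq (k : Nat) (fuel : Nat) (l acc : List Char) (h : l.length ≤ fuel) :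
    PySem.Chars.replace.go (List.replicate (k+1) 'd') (List.replicate (k+1) 'x') fuel l acc
      = acc.reverse ++ pvRepl k l := by
  induction fuel generalizing l acc with
  | zero =>
      have : l = [] := by cases l <;> simp_all
      subst this
      simp [PySem.Chars.replace.go, pvRepl]
  | succ fuel ih =>
      cases l with
      | nil => simp [PySem.Chars.replace.go, pvRepl]
      | cons c cs =>
          rw [PySem.Chars.replace.go, pvRepl]
          by_cases hp : (List.replicate (k+1) 'd').isPrefixOf (c :: cs)
          · have hlen : k + 1 ≤ (c :: cs).length := by
              have := (List.isPrefixOf_iff_prefix.mp hp).length_le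
              simpa using this
            rw [if_pos hp, if_pos hp]
            simp only [List.length_replicate]
            rw [ih (List.drop (k+1) (c :: cs)) _ (by simp at h ⊢; omega)]
            simp
          · rw [if_neg hp, if_neg hp]
            rw [ih cs (c :: acc) (by simp at h ⊢; omega)]
            simp

theorem pv_replace_eq (k : Nat) (s : List Char) :
    PySem.Chars.replace s (List.replicate (k+1) 'd') (List.replicate (k+1) 'x') = pvRepl k s := by
  rw [PySem.Chars.replace]
  rw [if_neg (by simp)]
  simpa using pv_go_eq k s.length s [] le_rfl

theorem pv_length_pvRepl (k : Nat) (l : List Char) : (pvRepl k l).length = l.length := by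
  induction l using pvRepl.induct k with
  | case1 => simp [pvRepl]
  | case2 c cs hp ih =>
      have hlen : k + 1 ≤ (c :: cs).length := by
        have := (List.isPrefixOf_iff_prefix.mp hp).length_le
        simpa using this
      rw [pvRepl, if_pos hp]
      simp only [List.drop_succ_cons] at ih
      simp [ih]
      simp at hlen
      omega
  | case3 c cs hp ih =>
      rw [pvRepl, if_neg hp]
      simp [ih]

theorem pv_prefix_of_le {k j : Nat} (h : k + 1 ≤ j) (l : List Char) :
    (List.replicate (k+1) 'd') <+: (List.replicate j 'd' ++ l) := by
  have : List.replicate j 'd' = List.replicate (k+1) 'd' ++ List.replicate (j - (k+1)) 'd' := by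
    rw [← List.replicate_add]
    congr 1
    omega
  rw [this, List.append_assoc]
  exact List.prefix_append _ _

theorem pv_not_prefix_small {k j : Nat} (hj : j < k + 1) {l : List Char}
    (hl : l.head? ≠ some 'd') :
    ¬ (List.replicate (k+1) 'd') <+: (List.replicate j 'd' ++ l) := by
  intro h
  cases l with
  | nil =>
      have := h.length_le
      simp at this
      omega
  | cons c l' =>
      have hc : c ≠ 'd' := by simpa using hl
      have hjlen : j < (List.replicate (k+1) 'd').length := by simp; omega
      have := h.getElem hjlen
      rw [List.getElem_append_right (by simp)] at this
      simp at this
      exact hc this.symm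

theorem pv_not_prefix_u (k : Nat) (X : List Char) :
    ¬ (List.replicate (k+1) 'd') <+: ('u' :: X) := by
  intro h
  rw [List.replicate_succ] at h
  rcases List.cons_prefix_cons.mp h with ⟨h1, _⟩
  exact absurd h1 (by decide)

theorem pv_pvRepl_run (k : Nat) (j : Nat) (l : List Char) (hl : l.head? ≠ some 'd') :
    pvRepl k (List.replicate j 'd' ++ l)
      = List.replicate (j / (k+1) * (k+1)) 'x' ++ List.replicate (j % (k+1)) 'd' ++ pvRepl k l := by
  induction j using Nat.strong_induction_on with
  | _ j IH =>
    by_cases hj : k + 1 ≤ j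
    · -- a full chunk of k+1 downs is consumed
      obtain ⟨m, rfl⟩ : ∃ m, j = m + (k+1) := ⟨j - (k+1), by omega⟩
      have hsplit : List.replicate (m + (k+1)) 'd' ++ l
          = 'd' :: (List.replicate k 'd' ++ (List.replicate m 'd' ++ l)) := by
        rw [show m + (k+1) = (k+m) + 1 by omega, List.replicate_succ, List.cons_append]
        congr 1
        rw [← List.append_assoc, ← List.replicate_add]
      have hp2 := pv_prefix_of_le (show k+1 ≤ m+(k+1) by omega) l
      rw [hsplit] at hp2
      have hdrop : List.drop (k+1) ('d' :: (List.replicate k 'd' ++ (List.replicate m 'd' ++ l)))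
          = List.replicate m 'd' ++ l := by
        rw [List.drop_succ_cons]
        exact List.drop_left' (by simp)
      rw [hsplit, pvRepl, if_pos (List.isPrefixOf_iff_prefix.mpr hp2), hdrop, IH m (by omega)]
      have hdiv : (m + (k+1)) / (k+1) = m / (k+1) + 1 := Nat.add_div_right _ (by omega)
      have hmod : (m + (k+1)) % (k+1) = m % (k+1) := Nat.add_mod_right _ _
      rw [hdiv, hmod, Nat.add_mul, one_mul, Nat.add_comm (m / (k+1) * (k+1)) (k+1)]
      conv_rhs => rw [List.replicate_add, List.append_assoc]
      simp only [List.append_assoc]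
    · -- fewer than k+1 downs remain: copied one by one
      cases j with
      | zero => simp
      | succ j' =>
          have hsplit : List.replicate (j'+1) 'd' ++ l = 'd' :: (List.replicate j' 'd' ++ l) := by
            simp [List.replicate_succ]
          rw [hsplit, pvRepl]
          rw [if_neg (by
            rw [List.isPrefixOf_iff_prefix]
            have := pv_not_prefix_small (k := k) (j := j'+1) (by omega) hl
            simpa [List.replicate_succ] using this)]
          rw [IH j' (by omega)]
          have h1 : (j'+1) / (k+1) = 0 := Nat.div_eq_of_lt (by omega)
          have h2 : j' / (k+1) = 0 := Nat.div_eq_of_lt (by omega)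
          have h3 : (j'+1) % (k+1) = j'+1 := Nat.mod_eq_of_lt (by omega)
          have h4 : j' % (k+1) = j' := Nat.mod_eq_of_lt (by omega)
          rw [h1, h2, h3, h4]
          simp [List.replicate_succ]

theorem pv_keep_repl_d (b : Nat) (xs : List (Int × Int × Int)) :
    pvKeep xs (List.replicate b 'd') = [] := by
  induction xs generalizing b with
  | nil => rfl
  | cons m ms ih =>
      cases b with
      | zero => rfl
      | succ b' => simpa [List.replicate_succ, pvKeep] using ih b'

theorem pv_keep_repl_d_append (xs ys : List (Int × Int × Int)) (cs : List Char) :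
    pvKeep (xs ++ ys) (List.replicate xs.length 'd' ++ cs) = pvKeep ys cs := by
  induction xs with
  | nil => simp
  | cons m ms ih => simpa [List.replicate_succ, pvKeep] using ih

theorem pv_keep_repl_x (a : Nat) (xs : List (Int × Int × Int)) (cs : List Char) :
    pvKeep xs (List.replicate a 'x' ++ cs) = xs.take a ++ pvKeep (xs.drop a) cs := by
  induction a generalizing xs with
  | zero => simp
  | succ a' ih =>
      cases xs with
      | nil => simp [pvKeep]
      | cons m ms => simpa [List.replicate_succ, pvKeep] using ih ms

theorem pv_keep_concat (xs : List (Int × Int × Int)) (cs : List Char)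
    (m : Int × Int × Int) (c : Char) (h : xs.length = cs.length) :
    pvKeep (xs ++ [m]) (cs ++ [c]) = pvKeep xs cs ++ (if c ≠ 'd' then [m] else []) := by
  induction xs generalizing cs with
  | nil =>
      cases cs with
      | nil =>
          simp only [List.nil_append]
          split_ifs with hc <;> simp [pvKeep, hc]
      | cons _ _ => simp at h
  | cons x xs' ih =>
      cases cs with
      | nil => simp at h
      | cons c' cs' =>
          simp at h
          simp only [List.cons_append, pvKeep]
          rw [ih cs' h]
          split_ifs <;> simp

theorem pv_all_down_map (up_val : Int) (run : List (Int × Int × Int))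
    (h : ∀ m ∈ run, (m.2.2 == up_val) = false) :
    run.map (pvTag up_val) = List.replicate run.length 'd' := by
  induction run with
  | nil => rfl
  | cons m ms ih =>
      have hm := h m (by simp)
      simp [pvTag, hm, List.replicate_succ]
      exact ih (fun m' hm' => h m' (by simp [hm']))

theorem pv_loop_eq (seq : List (Int × Int × Int)) (out : List Char)
    (hlen : seq.length ≤ out.length) (n : Nat) (hn : n ≤ seq.length) :
    (PySem.List.pyRange 0 (n : Int) 1).foldl
      (fun new_sequence i =>
        match PySem.List.pyGet? out i, PySem.List.pyGet? seq i with
        | some c, some m => if c ≠ 'd' then new_sequence ++ [m] else new_sequence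
        | _, _ => new_sequence) []
      = pvKeep (seq.take n) (out.take n) := by
  induction n with
  | zero => simp [PySem.List.pyRange_one_eq_nil, pvKeep]
  | succ n ih =>
      have hn' : n ≤ seq.length := by omega
      have hns : n < seq.length := by omega
      have hno : n < out.length := by omega
      have hr : PySem.List.pyRange 0 ((n+1 : Nat) : Int) 1
          = PySem.List.pyRange 0 (n : Int) 1 ++ [(n : Int)] := by
        push_cast
        exact PySem.List.pyRange_one_succ_right (by positivity)
      rw [hr, List.foldl_append, ih hn']
      have hgo : PySem.List.pyGet? out ((n : Nat) : Int) = some out[n] := by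
        rw [PySem.List.pyGet?_natCast]
        exact List.getElem?_eq_getElem hno
      have hgs : PySem.List.pyGet? seq ((n : Nat) : Int) = some seq[n] := by
        rw [PySem.List.pyGet?_natCast]
        exact List.getElem?_eq_getElem hns
      simp only [List.foldl_cons, List.foldl_nil, hgo, hgs]
      have hts : seq.take (n+1) = seq.take n ++ [seq[n]] := by
        rw [List.take_add_one, List.getElem?_eq_getElem hns]
        rfl
      have hto : out.take (n+1) = out.take n ++ [out[n]] := by
        rw [List.take_add_one, List.getElem?_eq_getElem hno]
        rfl
      rw [hts, hto, pv_keep_concat _ _ _ _ (by simp; omega)]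
      split_ifs <;> simp

-- tolerance ≤ 0: A's replace is a no-op (empty pattern, empty replacement), so A keeps
-- exactly the up-moves; B's flush contributes nothing.
theorem pv_nonpos_case (tolerance up_val : Int) (ht : ¬ tolerance > 0)
    (seq : List (Int × Int × Int)) :
    ∀ run, pvKeep seq (seq.map (pvTag up_val)) = pvGoB tolerance up_val run seq := by
  induction seq with
  | nil => intro run; simp [pvKeep, pvGoB, pvFlush, ht]
  | cons m rest ih =>
      intro run
      by_cases hm : (m.2.2 == up_val) = true
      · have h1 : pvGoB tolerance up_val run (m :: rest)
            = pvFlush tolerance run ++ m :: pvGoB tolerance up_val [] rest := by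
          simp only [pvGoB, hm, if_true]
        have h2 : pvFlush tolerance run = [] := by rw [pvFlush, if_neg ht]
        rw [h1, h2, List.nil_append, List.map_cons,
          show pvTag up_val m = 'u' from by simp [pvTag, hm]]
        rw [pvKeep, if_pos (by decide), ih []]
      · have h1 : pvGoB tolerance up_val run (m :: rest)
            = pvGoB tolerance up_val (run ++ [m]) rest := by
          simp only [pvGoB, hm, if_false, Bool.false_eq_true]
        rw [h1, List.map_cons, show pvTag up_val m = 'd' from by simp [pvTag, hm]]
        rw [pvKeep, if_neg (by simp)]
        exact ih _

theorem pv_flush_take (tolerance : Int) (k : Nat) (hk : tolerance.toNat = k + 1)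
    (run : List (Int × Int × Int)) :
    pvFlush tolerance run = run.take (run.length / (k+1) * (k+1)) := by
  have ht : tolerance > 0 := by omega
  have htink : tolerance = ((k+1 : Nat) : Int) := by omega
  rw [pvFlush, if_pos ht, htink]
  rw [PySem.Int.floordiv_natCast]
  congr 1

-- tolerance > 0 (tolerance.toNat = k+1): the greedy replace turns each maximal run of j
-- downs into j/(k+1)*(k+1) x's followed by j%(k+1) d's; the filter keeps exactly the x-part.
theorem pv_pos_case (tolerance up_val : Int) (k : Nat) (hk : tolerance.toNat = k + 1)
    (seq : List (Int × Int × Int)) :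
    ∀ run, (∀ m ∈ run, (m.2.2 == up_val) = false) →
      pvKeep (run ++ seq) (pvRepl k ((run ++ seq).map (pvTag up_val)))
        = pvGoB tolerance up_val run seq := by
  induction seq with
  | nil =>
      intro run hrun
      have hmap : (run ++ ([] : List (Int × Int × Int))).map (pvTag up_val)
          = List.replicate run.length 'd' ++ [] := by
        simp [pv_all_down_map up_val run hrun]
      rw [hmap, pv_pvRepl_run k run.length [] (by simp)]
      simp only [pvRepl, List.append_nil]
      rw [pv_keep_repl_x, pv_keep_repl_d]
      rw [pvGoB, pv_flush_take tolerance k hk run]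
      simp
  | cons m rest ih =>
      intro run hrun
      by_cases hm : (m.2.2 == up_val) = true
      · -- up-move: flush the pending run, keep the move, restart
        have hmap : (run ++ m :: rest).map (pvTag up_val)
            = List.replicate run.length 'd' ++ ('u' :: rest.map (pvTag up_val)) := by
          simp [pv_all_down_map up_val run hrun, pvTag, hm]
        rw [hmap, pv_pvRepl_run k run.length _ (by simp)]
        have hreplu : pvRepl k ('u' :: rest.map (pvTag up_val))
            = 'u' :: pvRepl k (rest.map (pvTag up_val)) := by
          rw [pvRepl, if_neg (by
            rw [List.isPrefixOf_iff_prefix]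
            exact pv_not_prefix_u k _)]
        rw [hreplu, List.append_assoc]
        have hale : run.length / (k+1) * (k+1) ≤ run.length := Nat.div_mul_le_self _ _
        rw [pv_keep_repl_x]
        rw [List.take_append_of_le_length hale, List.drop_append_of_le_length hale]
        have hlendrop : (run.drop (run.length / (k+1) * (k+1))).length = run.length % (k+1) := by
          simp
          have h1 := Nat.div_add_mod run.length (k+1)
          have h2 : run.length / (k+1) * (k+1) = (k+1) * (run.length / (k+1)) :=
            Nat.mul_comm _ _
          omega
        rw [show List.replicate (run.length % (k+1)) 'd'
              = List.replicate (run.drop (run.length / (k+1) * (k+1))).length 'd' from by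
            rw [hlendrop]]
        rw [pv_keep_repl_d_append]
        rw [pvKeep, if_pos (by decide)]
        have hrest := ih [] (by simp)
        simp only [List.nil_append] at hrest
        rw [hrest]
        simp only [pvGoB, hm, if_true]
        rw [pv_flush_take tolerance k hk run]
      · -- down-move: it joins the pending run
        rw [show run ++ m :: rest = (run ++ [m]) ++ rest from by simp]
        rw [ih (run ++ [m]) (by
          intro m' hm'
          rcases List.mem_append.mp hm' with h | h
          · exact hrun m' h
          · simp at h; subst h; simpa using hm)]
        simp only [pvGoB, hm, if_false, Bool.false_eq_true]

-- ===== VERDICT (by name: the statement is the Claim_ definition above) =====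
theorem edit_control_sequence_spec : Claim_equal_edit_control_sequence := by
  intro seq tolerance up_val _dom
  unfold Spec_edit_control_sequence edit_control_sequence edit_control_sequence_alt
  simp only []
  rw [pv_foldl_string up_val seq []]
  simp only [List.nil_append]
  rcases Nat.eq_zero_or_pos tolerance.toNat with h0 | hpos
  · -- tolerance ≤ 0: replace("", "") is a no-op
    rw [h0]
    simp only [List.replicate_zero]
    rw [pv_replace_empty]
    rw [pv_loop_eq (seq := seq) (out := seq.map (pvTag up_val)) (by simp) seq.length le_rfl]
    rw [List.take_length, List.take_of_length_le (by simp)]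
    exact pv_nonpos_case tolerance up_val (by omega) seq []
  · -- tolerance > 0
    obtain ⟨k, hk⟩ : ∃ k, tolerance.toNat = k + 1 := ⟨tolerance.toNat - 1, by omega⟩
    rw [hk, pv_replace_eq k]
    rw [pv_loop_eq (seq := seq) (out := pvRepl k (seq.map (pvTag up_val)))
      (by rw [pv_length_pvRepl]; simp) seq.length le_rfl]
    rw [List.take_length, List.take_of_length_le (by rw [pv_length_pvRepl]; simp)]
    have := pv_pos_case tolerance up_val k hk seq [] (by simp)
    simpa using this
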